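-- pv_equiv track=rewrite | github.com/zhouyi-xiaoxiao/valley-k-small | packages/vkcore/src/vkcore/grid2d/rect_bimodality/cli.py | polyline_points
-- ===== SOURCE A (Python) =====
-- from typing import Any, Dict, Iterable, List, Sequence, Tuple
--
-- Coord = Tuple[int, int]
--
-- def segment_points(a: Coord, b: Coord) -> List[Coord]:
--     if a[0] != b[0] and a[1] != b[1]:
--         raise ValueError("segment must be axis-aligned")
--     points: List[Coord] = []
--     if a[0] == b[0]:
--         y0, y1 = sorted((a[1], b[1]))
--         for y in range(y0, y1 + 1):
--             points.append((a[0], y))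
--         if b[1] < a[1]:
--             points.reverse()
--         return points
--     x0, x1 = sorted((a[0], b[0]))
--     for x in range(x0, x1 + 1):
--         points.append((x, a[1]))
--     if b[0] < a[0]:
--         points.reverse()
--     return points
--
-- def polyline_points(nodes: Sequence[Coord]) -> List[Coord]:
--     if len(nodes) < 2:
--         raise ValueError("polyline needs >=2 nodes")
--     out: List[Coord] = []
--     for i in range(len(nodes) - 1):
--         seg = segment_points(nodes[i], nodes[i + 1])
--         if i > 0:
--             seg = seg[1:]
--         out.extend(seg)
--     return out
-- ===== SOURCE B (Python) =====
-- def polyline_points(nodes):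
--     if len(nodes) < 2:
--         raise ValueError("polyline needs >=2 nodes")
--     out = [tuple(nodes[0])]
--     for a, b in zip(nodes, nodes[1:]):
--         if a[0] != b[0] and a[1] != b[1]:
--             raise ValueError("segment must be axis-aligned")
--         sx = (a[0] < b[0]) - (b[0] < a[0])
--         sy = (a[1] < b[1]) - (b[1] < a[1])
--         cur = tuple(a)
--         while cur != tuple(b):
--             cur = (cur[0] + sx, cur[1] + sy)
--             out.append(cur)
--     return out
-- ===== Notes on version B (the rewrite author's own statement) =====
-- stated objective: alternative
-- what changed: B replaces A's per-segment sort/range-build/conditional-reverse plus seg[1:] trimming with a single continuous walk: it emits the first node once, then for each consecutive pair steps unit-by-unit in the sign direction until the endpoint, appending each new point.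
-- outside the precondition, e.g. on polyline_points([(0, 0)]): A raises ValueError, B raises ValueError; on polyline_points([(0, 0), (1, 2)]): A raises ValueError, B raises ValueError
import Mathlib
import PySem

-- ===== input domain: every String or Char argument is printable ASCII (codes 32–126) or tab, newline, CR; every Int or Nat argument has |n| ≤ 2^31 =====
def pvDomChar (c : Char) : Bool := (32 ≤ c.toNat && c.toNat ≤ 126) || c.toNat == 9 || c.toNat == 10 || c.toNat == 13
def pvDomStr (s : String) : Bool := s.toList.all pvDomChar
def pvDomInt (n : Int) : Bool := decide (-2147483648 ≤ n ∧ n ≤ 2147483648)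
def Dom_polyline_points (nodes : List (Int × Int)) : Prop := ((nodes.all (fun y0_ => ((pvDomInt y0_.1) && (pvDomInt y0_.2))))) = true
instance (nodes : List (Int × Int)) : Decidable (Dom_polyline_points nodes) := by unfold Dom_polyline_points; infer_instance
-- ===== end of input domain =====

-- B replaces A's per-segment sort/range/reverse-then-trim construction by one continuous
-- sign-step walk that emits each point after the first exactly once (objective: alternative).

-- ===== PORT A =====
-- segment_points; the non-axis-aligned ValueError case returns [] here and is excluded by Pre_.
-- sorted((u,v)) of two ints is (min u v, max u v); seg[1:] on a list is List.drop 1 (exact for index 1 ≥ 0).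
def segment_points (a b : Int × Int) : List (Int × Int) :=
  if a.1 ≠ b.1 ∧ a.2 ≠ b.2 then []
  else if a.1 = b.1 then
    let y0 := min a.2 b.2
    let y1 := max a.2 b.2
    let points := (PySem.List.pyRange y0 (y1 + 1) 1).map (fun y => (a.1, y))
    if b.2 < a.2 then points.reverse else points
  else
    let x0 := min a.1 b.1
    let x1 := max a.1 b.1
    let points := (PySem.List.pyRange x0 (x1 + 1) 1).map (fun x => (x, a.2))
    if b.1 < a.1 then points.reverse else points

-- the len(nodes)<2 ValueError case returns [] here and is excluded by Pre_; indices i, i+1 are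
-- always in range inside the loop, so nodes[i] is pyGetD with an arbitrary default.
def polyline_points (nodes : List (Int × Int)) : List (Int × Int) :=
  if nodes.length < 2 then []
  else
    (PySem.List.pyRange 0 ((nodes.length : Int) - 1) 1).foldl
      (fun out i =>
        let seg := segment_points (PySem.List.pyGetD nodes i (0, 0)) (PySem.List.pyGetD nodes (i + 1) (0, 0))
        let seg := if i > 0 then seg.drop 1 else seg
        out ++ seg) []

-- ===== PORT B =====
-- 'while cur != b: cur += (sx,sy); out.append(cur)'; fuel = exact number of iterations.
def stepWalk (sx sy : Int) (cur b : Int × Int) : Nat → List (Int × Int)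
  | 0 => []
  | n + 1 =>
    if cur = b then []
    else
      let c := (cur.1 + sx, cur.2 + sy)
      c :: stepWalk sx sy c b n

-- the per-pair loop of B; the non-axis-aligned ValueError case returns [] and is excluded by Pre_.
def goWalk (a : Int × Int) : List (Int × Int) → List (Int × Int)
  | [] => []
  | b :: rest =>
    if a.1 ≠ b.1 ∧ a.2 ≠ b.2 then []
    else
      let sx := (if a.1 < b.1 then (1 : Int) else 0) - (if b.1 < a.1 then 1 else 0)
      let sy := (if a.2 < b.2 then (1 : Int) else 0) - (if b.2 < a.2 then 1 else 0)
      stepWalk sx sy a b ((b.1 - a.1).natAbs + (b.2 - a.2).natAbs) ++ goWalk b rest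

-- the len(nodes)<2 ValueError case returns [] here and is excluded by Pre_.
def polyline_points_alt (nodes : List (Int × Int)) : List (Int × Int) :=
  match nodes with
  | [] => []
  | [_] => []
  | a :: rest => a :: goWalk a rest

-- ===== PRECONDITION & SPEC =====
-- Pre_ excludes exactly the inputs on which A raises ValueError: fewer than 2 nodes, or a
-- consecutive pair that is neither horizontally nor vertically aligned (B raises there too).
def Pre_polyline_points (nodes : List (Int × Int)) : Prop :=
  2 ≤ nodes.length ∧ ((nodes.zip nodes.tail).all (fun p => p.1.1 == p.2.1 || p.1.2 == p.2.2)) = true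
instance (nodes : List (Int × Int)) : Decidable (Pre_polyline_points nodes) := by
  unfold Pre_polyline_points; infer_instance

def pvWitness_polyline_points : (List (Int × Int)) := [(0, 0), (0, 2), (3, 2), (3, 1)]

def Spec_polyline_points (nodes : List (Int × Int)) (out : List (Int × Int)) : Prop := out = polyline_points_alt nodes
instance (nodes : List (Int × Int)) (out : List (Int × Int)) : Decidable (Spec_polyline_points nodes out) := by unfold Spec_polyline_points; infer_instance

-- ===== CLAIM (what is proved, stated in full; the proofs are below) =====
def Claim_equal_polyline_points : Prop := ∀ (nodes : List (Int × Int)), Dom_polyline_points nodes → Pre_polyline_points nodes → Spec_polyline_points nodes (polyline_points nodes)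

-- ===== LEMMAS AND PROOFS =====

-- B's walk for one aligned segment a→b (what one iteration of goWalk emits).
def walkSeg (a b : Int × Int) : List (Int × Int) :=
  stepWalk ((if a.1 < b.1 then (1 : Int) else 0) - (if b.1 < a.1 then 1 else 0))
           ((if a.2 < b.2 then (1 : Int) else 0) - (if b.2 < a.2 then 1 else 0))
           a b ((b.1 - a.1).natAbs + (b.2 - a.2).natAbs)

-- A's trailing segments, recast as recursion on consecutive pairs.
def tailA (b : Int × Int) : List (Int × Int) → List (Int × Int)
  | [] => []
  | c :: r => (segment_points b c).drop 1 ++ tailA c r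

theorem stepWalk_up_y (x y : Int) (n : Nat) :
    stepWalk 0 1 (x, y) (x, y + n) n =
      (PySem.List.pyRange (y + 1) (y + n + 1) 1).map (fun t => (x, t)) := by
  induction n generalizing y with
  | zero => simp [stepWalk]
  | succ n ih =>
    have hne : (x, y) ≠ (x, y + ((n + 1 : Nat) : Int)) := by
      intro h; have := congrArg Prod.snd h; simp at this; omega
    rw [PySem.List.pyRange_one_cons (by push_cast; omega)]
    have := ih (y + 1)
    simp only [stepWalk, if_neg hne, List.map_cons, add_zero]
    rw [show y + ((n + 1 : Nat) : Int) = y + 1 + n by push_cast; ring] at *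
    rw [this]

theorem stepWalk_down_y (x y : Int) (n : Nat) :
    stepWalk 0 (-1) (x, y + n) (x, y) n =
      ((PySem.List.pyRange y (y + n) 1).map (fun t => (x, t))).reverse := by
  induction n generalizing y with
  | zero => simp [stepWalk]
  | succ n ih =>
    have hne : (x, y + ((n + 1 : Nat) : Int)) ≠ (x, y) := by
      intro h; have := congrArg Prod.snd h; simp at this; omega
    rw [show y + ((n + 1 : Nat) : Int) = y + n + 1 by push_cast; ring] at *
    rw [PySem.List.pyRange_one_succ_right (by omega : y ≤ y + (n:Int))]
    simp only [stepWalk, if_neg hne]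
    have := ih y
    simp [this]

theorem stepWalk_up_x (y x : Int) (n : Nat) :
    stepWalk 1 0 (x, y) (x + n, y) n =
      (PySem.List.pyRange (x + 1) (x + n + 1) 1).map (fun t => (t, y)) := by
  induction n generalizing x with
  | zero => simp [stepWalk]
  | succ n ih =>
    have hne : (x, y) ≠ (x + ((n + 1 : Nat) : Int), y) := by
      intro h; have := congrArg Prod.fst h; simp at this; omega
    rw [PySem.List.pyRange_one_cons (by push_cast; omega)]
    have := ih (x + 1)
    simp only [stepWalk, if_neg hne, List.map_cons, add_zero]
    rw [show x + ((n + 1 : Nat) : Int) = x + 1 + n by push_cast; ring] at *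
    rw [this]

theorem stepWalk_down_x (y x : Int) (n : Nat) :
    stepWalk (-1) 0 (x + n, y) (x, y) n =
      ((PySem.List.pyRange x (x + n) 1).map (fun t => (t, y))).reverse := by
  induction n generalizing x with
  | zero => simp [stepWalk]
  | succ n ih =>
    have hne : (x + ((n + 1 : Nat) : Int), y) ≠ (x, y) := by
      intro h; have := congrArg Prod.fst h; simp at this; omega
    rw [show x + ((n + 1 : Nat) : Int) = x + n + 1 by push_cast; ring] at *
    rw [PySem.List.pyRange_one_succ_right (by omega : x ≤ x + (n:Int))]
    simp only [stepWalk, if_neg hne]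
    have := ih x
    simp [this]

-- Characterisation: on an aligned segment, A's segment list is the start node followed by B's walk.
theorem seg_eq (a b : Int × Int) (hal : a.1 = b.1 ∨ a.2 = b.2) :
    segment_points a b = a :: walkSeg a b := by
  obtain ⟨ax, ay⟩ := a
  obtain ⟨bx, by'⟩ := b
  simp only at hal
  by_cases hx : ax = bx
  · subst hx
    simp only [segment_points, walkSeg]
    rw [if_neg (by simp)]
    simp only [if_true, lt_irrefl, if_false, sub_self, Int.natAbs_zero,
      Nat.zero_add]
    rcases lt_trichotomy ay by' with h | h | h
    · rw [if_neg (by omega)]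
      have hn : by' = ay + (((by' - ay).natAbs : Nat) : Int) := by omega
      rw [min_eq_left (le_of_lt h), max_eq_right (le_of_lt h)]
      rw [if_pos h, if_neg (by omega)]
      conv_lhs => rw [hn]
      rw [PySem.List.pyRange_one_cons (by omega), List.map_cons]
      conv_rhs => rw [hn]
      simp only [add_sub_cancel_left, Int.natAbs_natCast]
      rw [show (1:Int) - 0 = 1 by ring, stepWalk_up_y]
    · subst h
      rw [if_neg (by omega), min_self, max_self]
      rw [PySem.List.pyRange_one_cons (by omega), List.map_cons,
        PySem.List.pyRange_one_eq_nil (by omega)]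
      simp [stepWalk]
    · rw [if_pos h]
      have hn : ay = by' + (((by' - ay).natAbs : Nat) : Int) := by omega
      rw [min_eq_right (le_of_lt h), max_eq_left (le_of_lt h)]
      rw [if_neg (by omega), if_pos h]
      conv_lhs => rw [hn]
      rw [PySem.List.pyRange_one_succ_right (by omega), List.map_append, List.reverse_append]
      conv_rhs => rw [hn]
      simp only [sub_add_cancel_left, Int.natAbs_neg, Int.natAbs_natCast]
      rw [show (0:Int) - 1 = -1 by ring, stepWalk_down_y]
      simp
  · have hy : ay = by' := by tauto
    subst hy
    simp only [segment_points, walkSeg]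
    rw [if_neg (by simp [hx]), if_neg hx]
    simp only [lt_irrefl, if_false, sub_self, Int.natAbs_zero, Nat.add_zero]
    rcases lt_trichotomy ax bx with h | h | h
    · rw [if_neg (by omega)]
      have hn : bx = ax + (((bx - ax).natAbs : Nat) : Int) := by omega
      rw [min_eq_left (le_of_lt h), max_eq_right (le_of_lt h)]
      rw [if_pos h, if_neg (by omega)]
      conv_lhs => rw [hn]
      rw [PySem.List.pyRange_one_cons (by omega), List.map_cons]
      conv_rhs => rw [hn]
      simp only [add_sub_cancel_left, Int.natAbs_natCast]
      rw [show (1:Int) - 0 = 1 by ring, stepWalk_up_x]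
    · exact absurd h hx
    · rw [if_pos h]
      have hn : ax = bx + (((bx - ax).natAbs : Nat) : Int) := by omega
      rw [min_eq_right (le_of_lt h), max_eq_left (le_of_lt h)]
      rw [if_neg (by omega), if_pos h]
      conv_lhs => rw [hn]
      rw [PySem.List.pyRange_one_succ_right (by omega), List.map_append, List.reverse_append]
      conv_rhs => rw [hn]
      simp only [sub_add_cancel_left, Int.natAbs_neg, Int.natAbs_natCast]
      rw [show (0:Int) - 1 = -1 by ring, stepWalk_down_x]
      simp

theorem tailA_eq_goWalk (rest : List (Int × Int)) (b : Int × Int)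
    (h : (((b :: rest).zip rest).all (fun p => p.1.1 == p.2.1 || p.1.2 == p.2.2)) = true) :
    tailA b rest = goWalk b rest := by
  induction rest generalizing b with
  | nil => rfl
  | cons c r ih =>
    simp only [List.zip_cons_cons, List.all_cons, Bool.and_eq_true, beq_iff_eq, Bool.or_eq_true] at h
    have hal : b.1 = c.1 ∨ b.2 = c.2 := h.1
    simp only [tailA, goWalk, if_neg (by tauto : ¬(b.1 ≠ c.1 ∧ b.2 ≠ c.2))]
    rw [seg_eq b c hal, ih c (by simpa using h.2)]
    rfl

-- A's indexed fold over range(len-1), recast as recursion on consecutive pairs.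
theorem flat_shift (l : List (Int × Int)) (b : Int × Int) :
    (List.range l.length).flatMap
      (fun k => (segment_points ((b :: l).getD k (0, 0)) ((b :: l).getD (k + 1) (0, 0))).drop 1)
      = tailA b l := by
  induction l generalizing b with
  | nil => rfl
  | cons c r ih =>
    rw [List.length_cons, List.range_succ_eq_map, List.flatMap_cons, List.flatMap_map]
    simp only [List.getD_cons_zero, List.getD_cons_succ]
    have h2 := ih c
    simp only [List.getD_cons_succ] at h2
    rw [h2]
    rfl

theorem polyA_shape (a b : Int × Int) (rest : List (Int × Int)) :
    polyline_points (a :: b :: rest) = segment_points a b ++ tailA b rest := by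
  rw [polyline_points, if_neg (by simp)]
  rw [PySem.List.foldl_append_eq_flatMap]
  have hm : (((a :: b :: rest).length : Int) - 1) = ((rest.length + 1 : Nat) : Int) := by
    simp
  rw [hm, PySem.List.pyRange_one]
  rw [List.flatMap_map]
  have hcast : ∀ k : Nat,
      (fun i : Int =>
        let seg := segment_points (PySem.List.pyGetD (a :: b :: rest) i (0, 0))
          (PySem.List.pyGetD (a :: b :: rest) (i + 1) (0, 0));
        if i > 0 then seg.drop 1 else seg) (0 + (k : Int))
      = (fun k : Nat =>
          if k > 0 then
            (segment_points ((a :: b :: rest).getD k (0, 0)) ((a :: b :: rest).getD (k + 1) (0, 0))).drop 1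
          else segment_points ((a :: b :: rest).getD k (0, 0)) ((a :: b :: rest).getD (k + 1) (0, 0))) k := by
    intro k
    simp only [zero_add]
    have h1 : ((k : Int) + 1) = ((k + 1 : Nat) : Int) := by push_cast; ring
    rw [h1]
    simp only [PySem.List.pyGetD_natCast]
    by_cases hk : k > 0
    · rw [if_pos (by exact_mod_cast hk), if_pos hk]
    · rw [if_neg (by omega), if_neg hk]
  have htoNat : (((rest.length + 1 : Nat) : Int) - 0).toNat = rest.length + 1 := by omega
  rw [htoNat]
  rw [List.flatMap_congr (fun k _ => hcast k)]
  rw [List.range_succ_eq_map, List.flatMap_cons, List.flatMap_map]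
  simp only [List.getD_cons_zero, List.getD_cons_succ, gt_iff_lt, lt_irrefl,
    if_false, Nat.zero_lt_succ, if_true, List.nil_append]
  congr 1
  have h3 := flat_shift rest b
  simp only [List.getD_cons_succ] at h3
  exact h3

-- ===== VERDICT (by name: the statement is the Claim_ definition above) =====
theorem polyline_points_spec : Claim_equal_polyline_points := by
  intro nodes _hd hpre
  obtain ⟨hlen, hch⟩ := hpre
  match nodes with
  | [] => simp at hlen
  | [_] => simp at hlen
  | a :: b :: rest =>
    simp only [List.tail_cons, List.zip_cons_cons, List.all_cons, Bool.and_eq_true, beq_iff_eq,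
      Bool.or_eq_true] at hch
    have hal : a.1 = b.1 ∨ a.2 = b.2 := hch.1
    show polyline_points _ = polyline_points_alt _
    rw [polyA_shape]
    show segment_points a b ++ tailA b rest = a :: goWalk a (b :: rest)
    rw [seg_eq a b hal, tailA_eq_goWalk rest b (by simpa using hch.2)]
    simp only [goWalk, if_neg (by tauto : ¬(a.1 ≠ b.1 ∧ a.2 ≠ b.2)), List.cons_append]
    rfl
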